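-- pv_equiv track=rewrite | github.com/usgs/waterdataui | lookup_generation/nwis_lookups.py | translate_codes_by_group
-- ===== SOURCE A (Python) =====
-- from itertools import groupby
--
-- def _get_lookup_value(code_lookup, name_key, desc_key):
--     """
--     Returns dict with 'name' and optional 'desc' properties derived from code_lookup
--     :param code_lookup:
--     :param name_key:
--     :param desc_key: Can be the null string
--     :rtype: dict
--     """
--     lookup_value = {'name': code_lookup.get(name_key)}
--     if desc_key:
--         lookup_value['desc'] = code_lookup.get(desc_key)
--     return lookup_value
--
-- def translate_codes_by_group(dict_iter, code_key, name_key):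
--     """
--     Translate dict_iter to a single dictionary where the code_key values will be be the keys with
--     the value a dictionary with 'name' and 'desc' properties. THe collection of dicts can have code_key
--     values that are repeated. The name_key value will be one of the name_key values.
--     :param dict_iter:
--     :param str code_key:
--     :param str name_key:
--     :return: dict
--     """
--
--     def has_code_key(lookup):
--         return code_key in lookup
--
--     def get_code(d):
--         return d.get(code_key)
--
--     filtered_dict = filter(has_code_key, dict_iter)
--
--     data = sorted(filtered_dict, key=get_code)
--     grouped_list = [(k, _get_lookup_value(next(g), name_key, '')) for k, g in groupby(data, key=get_code)]
--     return dict(grouped_list)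
-- ===== SOURCE B (Python) =====
-- def translate_codes_by_group(dict_iter, code_key, name_key):
--     """
--     One pass: keep the first occurrence per code with setdefault, then emit
--     the codes in sorted order.
--     """
--     seen = {}
--     for d in dict_iter:
--         if code_key in d:
--             seen.setdefault(d[code_key], {'name': d.get(name_key)})
--     return {code: seen[code] for code in sorted(seen)}
-- ===== Notes on version B (the rewrite author's own statement) =====
-- stated objective: simpler
-- what changed: Replaces filter + sort + itertools.groupby + dict(list-comprehension) by a single dedup pass with setdefault keeping the first occurrence per code, followed by one dict comprehension over sorted(seen).
-- outside the precondition, e.g. on translate_codes_by_group([{'c': '1'}], 'c', 'n'): A returns {'1': {'name': None}}, B returns {'1': {'name': None}}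
import Mathlib
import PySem

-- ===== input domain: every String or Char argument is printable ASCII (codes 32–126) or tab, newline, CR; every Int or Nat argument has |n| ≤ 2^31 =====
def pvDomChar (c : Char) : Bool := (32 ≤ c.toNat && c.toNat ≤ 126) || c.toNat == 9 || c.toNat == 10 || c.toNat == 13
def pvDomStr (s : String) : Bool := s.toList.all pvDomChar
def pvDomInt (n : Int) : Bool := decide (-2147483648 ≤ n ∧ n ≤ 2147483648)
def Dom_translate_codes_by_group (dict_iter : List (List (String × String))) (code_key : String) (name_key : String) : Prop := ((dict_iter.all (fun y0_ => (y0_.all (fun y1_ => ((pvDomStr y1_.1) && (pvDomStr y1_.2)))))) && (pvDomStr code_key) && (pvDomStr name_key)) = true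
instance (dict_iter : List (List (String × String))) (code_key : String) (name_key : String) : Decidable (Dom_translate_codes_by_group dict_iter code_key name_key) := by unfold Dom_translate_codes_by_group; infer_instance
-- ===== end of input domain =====

-- B replaces filter+sort+groupby+dict() by one setdefault dedup pass followed by a
-- dict comprehension over the sorted codes (objective: simpler; same asymptotic cost).


-- ===== PORT A =====
-- Python dicts arrive as association lists; lookup is first match.
def pvGet? (d : List (String × String)) (k : String) : Option String :=
  (d.find? (fun p => p.1 == k)).map (·.2)

-- get_code(d) = d.get(code_key); wherever it is used the key is present, so the
-- string is read off with getD "" (the default branch is never the one Python sees).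
def pvCode (code_key : String) (d : List (String × String)) : String :=
  (pvGet? d code_key).getD ""

-- _get_lookup_value(d, name_key, ''): {'name': d.get(name_key)}; under Pre_ the name
-- value is a string (getD "" is never the defaulted branch inside Pre_).
def pvLookupValue (d : List (String × String)) (name_key : String) : List (String × String) :=
  [("name", (pvGet? d name_key).getD "")]

-- itertools.groupby(data, key=get_code) with next(g): (key, first element) per maximal run.
def pvGroupFirst (code_key : String) : List (List (String × String)) → List (String × List (String × String))
  | [] => []
  | d :: rest =>
    (pvCode code_key d, d) ::
      pvGroupFirst code_key (rest.dropWhile (fun y => pvCode code_key y == pvCode code_key d))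
termination_by l => l.length
decreasing_by
  exact Nat.lt_succ_of_le (List.length_dropWhile_le _ _)

def translate_codes_by_group (dict_iter : List (List (String × String))) (code_key : String) (name_key : String) : List (String × List (String × String)) :=
  let filtered := dict_iter.filter (fun d => (pvGet? d code_key).isSome)
  let data := PySem.List.sorted filtered (pvCode code_key) false
  let grouped_list := (pvGroupFirst code_key data).map (fun p => (p.1, pvLookupValue p.2 name_key))
  (PySem.Dict.ofList grouped_list).items

-- ===== PORT B =====
def translate_codes_by_group_alt (dict_iter : List (List (String × String))) (code_key : String) (name_key : String) : List (String × List (String × String)) :=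
  let seen : PySem.Dict String (List (String × String)) :=
    dict_iter.foldl (fun seen d =>
      if (pvGet? d code_key).isSome then
        seen.setdefault (pvCode code_key d) (pvLookupValue d name_key)
      else seen) PySem.Dict.empty
  (PySem.List.sorted seen.keys (fun x => x) false).map (fun k => (k, seen.getD k []))

-- ===== PRECONDITION & SPEC =====
-- Pre_ excludes inputs where some dict contains code_key but not name_key: there Python
-- returns {'name': None}, a value outside the declared str-valued result type (both A and
-- B return that same untypeable value).
def Pre_translate_codes_by_group (dict_iter : List (List (String × String))) (code_key : String) (name_key : String) : Prop :=
  ∀ d ∈ dict_iter, (pvGet? d code_key).isSome → (pvGet? d name_key).isSome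

instance (dict_iter : List (List (String × String))) (code_key : String) (name_key : String) : Decidable (Pre_translate_codes_by_group dict_iter code_key name_key) := by unfold Pre_translate_codes_by_group; infer_instance

def pvWitness_translate_codes_by_group : (List (List (String × String))) × String × String :=
  ([[("c", "2"), ("n", "beta")], [("c", "1"), ("n", "alpha")], [("c", "2"), ("n", "gamma")], [("x", "0")]], "c", "n")

def Spec_translate_codes_by_group (dict_iter : List (List (String × String))) (code_key : String) (name_key : String) (out : List (String × List (String × String))) : Prop := out = translate_codes_by_group_alt dict_iter code_key name_key
instance (dict_iter : List (List (String × String))) (code_key : String) (name_key : String) (out : List (String × List (String × String))) : Decidable (Spec_translate_codes_by_group dict_iter code_key name_key out) := by unfold Spec_translate_codes_by_group; infer_instance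

-- ===== CLAIM (what is proved, stated in full; the proofs are below) =====
def Claim_equal_translate_codes_by_group : Prop := ∀ (dict_iter : List (List (String × String))) (code_key : String) (name_key : String), Dom_translate_codes_by_group dict_iter code_key name_key → Pre_translate_codes_by_group dict_iter code_key name_key → Spec_translate_codes_by_group dict_iter code_key name_key (translate_codes_by_group dict_iter code_key name_key)

-- ===== LEMMAS AND PROOFS =====

-- Inserting x into a key-sorted list puts it after all elements of equal key:
-- the equal-key fibre gains x at the end.
theorem pv_insertBy_filter {α : Type} (key : α → String) (x : α) (k : String) :
    ∀ (ys : List α), ys.Pairwise (fun a b => key a ≤ key b) →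
    (PySem.List.insertBy (fun a b => decide (key a < key b)) x ys).filter (fun y => key y == k)
      = ys.filter (fun y => key y == k) ++ (if key x == k then [x] else []) := by
  intro ys
  induction ys with
  | nil =>
    intro _
    by_cases h : key x = k <;> simp [PySem.List.insertBy, h]
  | cons y t ih =>
    intro hp
    rw [List.pairwise_cons] at hp
    obtain ⟨hy, ht⟩ := hp
    by_cases hlt : key x < key y
    · have hins : PySem.List.insertBy (fun a b => decide (key a < key b)) x (y :: t)
          = x :: y :: t := by
        simp [PySem.List.insertBy, hlt]
      rw [hins]
      by_cases hxk : key x = k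
      · have hnone : ∀ z ∈ y :: t, (key z == k) = false := by
          intro z hz
          rcases List.mem_cons.mp hz with rfl | hz'
          · simp only [beq_eq_false_iff_ne, ne_eq]
            exact fun hc => absurd (hxk ▸ hc ▸ hlt) (lt_irrefl _)
          · simp only [beq_eq_false_iff_ne, ne_eq]
            intro hc
            exact absurd (hxk ▸ hc ▸ lt_of_lt_of_le hlt (hy z hz')) (lt_irrefl _)
        rw [List.filter_cons, if_pos (by simp [hxk]), List.filter_eq_nil_iff.mpr (by
          intro z hz; simp [hnone z hz]), if_pos (by simp [hxk])]
        simp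
      · have hx0 : (key x == k) = false := by simp [hxk]
        simp [List.filter_cons, hx0]
    · have hins : PySem.List.insertBy (fun a b => decide (key a < key b)) x (y :: t)
          = y :: PySem.List.insertBy (fun a b => decide (key a < key b)) x t := by
        simp [PySem.List.insertBy, hlt]
      rw [hins, List.filter_cons, List.filter_cons, ih ht]
      cases h : (key y == k) <;> simp

-- Stability of PySem.List.sorted, as preservation of each equal-key fibre.
theorem pv_sorted_filter {α : Type} (key : α → String) (k : String) (xs : List α) :
    (PySem.List.sorted xs key false).filter (fun y => key y == k)
      = xs.filter (fun y => key y == k) := by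
  induction xs using List.reverseRecOn with
  | nil => rfl
  | append_singleton xs x ih =>
    rw [PySem.List.sorted_eq_foldl_insertBy, List.foldl_append, List.foldl_cons, List.foldl_nil,
      ← PySem.List.sorted_eq_foldl_insertBy,
      pv_insertBy_filter key x k _ (PySem.List.sorted_pairwise xs key), ih, List.filter_append]
    by_cases h : key x = k <;> simp [h]

-- On a key-sorted list, dropping the leading run of the minimal key drops that key entirely.
theorem pv_dropWhile_sorted {α : Type} (key : α → String) (x : α) (rest : List α)
    (h : (x :: rest).Pairwise (fun a b => key a ≤ key b)) :
    rest.dropWhile (fun y => key y == key x) = rest.filter (fun y => !(key y == key x)) := by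
  induction rest with
  | nil => rfl
  | cons y t ih =>
    rw [List.pairwise_cons] at h
    obtain ⟨hx, hyt⟩ := h
    rw [List.pairwise_cons] at hyt
    obtain ⟨hy, ht⟩ := hyt
    by_cases he : key y = key x
    · rw [List.dropWhile_cons, if_pos (by simp [he]), List.filter_cons, if_neg (by simp [he])]
      exact ih (List.pairwise_cons.mpr ⟨fun z hz => le_trans (hx y (by simp)) (he ▸ hy z hz), ht⟩)
    · have hlt : key x < key y := lt_of_le_of_ne (hx y (by simp)) (Ne.symm he)
      rw [List.dropWhile_cons, if_neg (by simp [he]), List.filter_cons, if_pos (by simp [he])]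
      rw [List.filter_eq_self.mpr]
      intro z hz
      simp only [Bool.not_eq_eq_eq_not, Bool.not_true, beq_eq_false_iff_ne, ne_eq]
      intro hc
      exact absurd (hc ▸ lt_of_lt_of_le hlt (hy z hz)) (lt_irrefl _)

-- Removing the fibre of a different key does not change find?.
theorem pv_find?_filter {α : Type} (key : α → String) (k c : String) (hkc : k ≠ c) :
    ∀ (l : List α),
      (l.filter (fun y => !(key y == c))).find? (fun y => key y == k)
        = l.find? (fun y => key y == k) := by
  intro l
  induction l with
  | nil => rfl
  | cons d t ih =>
    by_cases hdc : key d = c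
    · rw [List.filter_cons, if_neg (by simp [hdc]), List.find?_cons]
      have : (key d == k) = false := by simp [hdc, hkc.symm]
      rw [this, ih]
    · rw [List.filter_cons, if_pos (by simp [hdc]), List.find?_cons, List.find?_cons]
      by_cases hdk : key d = k <;> simp [hdk, ih]

theorem pv_foldl_add_of_mem (c : String) : ∀ (cs : List String) (s : PySem.Set String), s.contains c →
    cs.foldl PySem.Set.add s = (cs.filter (fun z => !(z == c))).foldl PySem.Set.add s := by
  intro cs
  induction cs with
  | nil => intro s _; rfl
  | cons z t ih =>
    intro s hs
    by_cases hzc : z = c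
    · rw [List.filter_cons, if_neg (by simp [hzc]), List.foldl_cons]
      have hs' : c ∈ s := by
        simpa [PySem.Set.contains, List.contains_eq_mem] using hs
      have : PySem.Set.add s z = s := by
        simp [PySem.Set.add, PySem.Set.contains, List.contains_eq_mem, hzc, hs']
      rw [this, ih s hs]
    · rw [List.filter_cons, if_pos (by simp [hzc]), List.foldl_cons, List.foldl_cons]
      apply ih
      simp only [PySem.Set.add]
      split
      · exact hs
      · simp only [PySem.Set.contains, List.contains_eq_mem] at hs ⊢
        simp at hs ⊢
        exact Or.inl hs

theorem pv_foldl_add_cons (c : String) : ∀ (cs : List String), (∀ z ∈ cs, (z == c) = false) →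
    ∀ (s : PySem.Set String), cs.foldl PySem.Set.add (c :: s) = c :: cs.foldl PySem.Set.add s := by
  intro cs
  induction cs with
  | nil => intro _ s; rfl
  | cons z t ih =>
    intro h s
    have hzc : (z == c) = false := h z (by simp)
    rw [List.foldl_cons, List.foldl_cons]
    have : PySem.Set.add (c :: s) z = c :: PySem.Set.add s z := by
      simp only [PySem.Set.add, PySem.Set.contains, List.contains_cons]
      rw [hzc]
      simp only [Bool.false_or]
      split <;> simp
    rw [this, ih (fun z hz => h z (by simp [hz]))]

-- set(c :: cs) = c followed by set(cs with c removed).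
theorem pv_setOfList_cons_filter (c : String) (cs : List String) :
    PySem.Set.ofList (c :: cs) = c :: PySem.Set.ofList (cs.filter (fun z => !(z == c))) := by
  rw [PySem.Set.ofList_eq_foldl, PySem.Set.ofList_eq_foldl, List.foldl_cons]
  have h0 : PySem.Set.add ([] : PySem.Set String) c = [c] := by simp [PySem.Set.add, PySem.Set.contains]
  rw [h0, pv_foldl_add_of_mem c cs [c] (by simp [PySem.Set.contains])]
  exact pv_foldl_add_cons c _ (fun z hz => by simpa using (List.mem_filter.mp hz).2) []

-- sorted distinct keys of a key-sorted (x :: rest): head's key, then the rest without it.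
theorem pv_sortedKeys_cons {α : Type} (key : α → String) (x : α) (rest : List α)
    (h : (x :: rest).Pairwise (fun a b => key a ≤ key b)) :
    PySem.List.sorted (PySem.Set.ofList ((x :: rest).map key)) (fun s => s) false
      = key x :: PySem.List.sorted
          (PySem.Set.ofList ((rest.filter (fun y => !(key y == key x))).map key)) (fun s => s) false := by
  have hperm : (key x :: PySem.List.sorted
      (PySem.Set.ofList ((rest.filter (fun y => !(key y == key x))).map key)) (fun s => s) false).Perm
      (PySem.Set.ofList ((x :: rest).map key)) := by
    rw [List.map_cons, pv_setOfList_cons_filter]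
    apply List.Perm.cons
    have hmf : (rest.map key).filter (fun z => !(z == key x))
        = (rest.filter (fun y => !(key y == key x))).map key := by
      rw [List.filter_map]
      rfl
    rw [hmf]
    exact PySem.List.sorted_perm _ _ _
  have hpw : (key x :: PySem.List.sorted
      (PySem.Set.ofList ((rest.filter (fun y => !(key y == key x))).map key)) (fun s => s) false).Pairwise (· < ·) := by
    rw [List.pairwise_cons]
    constructor
    · intro s hs
      rw [PySem.List.mem_sorted, PySem.Set.mem_ofList, List.mem_map] at hs
      obtain ⟨y, hy, rfl⟩ := hs
      obtain ⟨hy1, hy2⟩ := List.mem_filter.mp hy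
      have hle : key x ≤ key y := (List.pairwise_cons.mp h).1 y hy1
      have hne : ¬ (key y == key x) := by simpa using hy2
      exact lt_of_le_of_ne hle (fun hc => hne (by simp [hc.symm]))
    · exact PySem.List.sorted_ofList_pairwise_lt _
  exact PySem.List.sorted_eq_of_perm_of_pairwise_lt _ _ _ hperm hpw

-- groupby-with-next over a key-sorted list, in closed form.
theorem pv_gf (ck : String) : ∀ (n : Nat) (S : List (List (String × String))), S.length ≤ n →
    S.Pairwise (fun a b => pvCode ck a ≤ pvCode ck b) →
    pvGroupFirst ck S
      = (PySem.List.sorted (PySem.Set.ofList (S.map (pvCode ck))) (fun s => s) false).map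
          (fun k => (k, (S.find? (fun d => pvCode ck d == k)).getD [])) := by
  intro n
  induction n with
  | zero =>
    intro S hS _
    have : S = [] := List.length_eq_zero_iff.mp (Nat.le_zero.mp hS)
    subst this
    rw [pvGroupFirst]
    rfl
  | succ n ih =>
    intro S hS hp
    cases S with
    | nil => rw [pvGroupFirst]; rfl
    | cons x rest =>
      rw [pvGroupFirst, pv_dropWhile_sorted (pvCode ck) x rest hp]
      set R := rest.filter (fun y => !(pvCode ck y == pvCode ck x)) with hR
      have hlen : R.length ≤ n := by
        rw [hR]
        have := List.length_filter_le (fun y => !(pvCode ck y == pvCode ck x)) rest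
        simp only [List.length_cons] at hS
        omega
      have hpR : R.Pairwise (fun a b => pvCode ck a ≤ pvCode ck b) := by
        rw [hR]
        exact (List.pairwise_cons.mp hp).2.sublist List.filter_sublist
      rw [ih R hlen hpR, pv_sortedKeys_cons (pvCode ck) x rest hp, List.map_cons]
      congr 1
      · have : (pvCode ck x == pvCode ck x) = true := by simp
        rw [List.find?_cons, this]
        rfl
      · apply List.map_congr_left
        intro k hk
        rw [PySem.List.mem_sorted, PySem.Set.mem_ofList, List.mem_map] at hk
        obtain ⟨y, hy, rfl⟩ := hk
        obtain ⟨hy1, hy2⟩ := List.mem_filter.mp hy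
        have hkx : pvCode ck y ≠ pvCode ck x := by simpa using hy2
        have hf : (pvCode ck x == pvCode ck y) = false := by simp [hkx.symm]
        rw [List.find?_cons, hf, ← pv_find?_filter (pvCode ck) (pvCode ck y) (pvCode ck x) hkx rest]

theorem pv_keys_setdefault {κ ν : Type} [BEq κ] [LawfulBEq κ] (d : PySem.Dict κ ν) (k : κ) (v : ν) :
    (d.setdefault k v).keys = PySem.Set.add d.keys k := by
  by_cases hc : d.contains k = true
  · have hk : k ∈ d.keys := (PySem.Dict.contains_iff_mem_keys d k).mp hc
    rw [PySem.Dict.setdefault_of_contains d v hc]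
    simp [PySem.Set.add, PySem.Set.contains, List.contains_eq_mem, hk]
  · have hc' : d.contains k = false := by simpa using hc
    have hk : ¬ k ∈ d.keys := fun h => hc ((PySem.Dict.contains_iff_mem_keys d k).mpr h)
    rw [PySem.Dict.setdefault_of_not_contains d v hc', PySem.Dict.keys_insert_of_not_contains d v hc']
    simp [PySem.Set.add, PySem.Set.contains, List.contains_eq_mem, hk]

-- The setdefault loop: lookup = first matching element of the traversed list.
theorem pv_foldl_sd_get?_pf (ck nk : String) :
    ∀ (L : List (List (String × String))) (seen : PySem.Dict String (List (String × String))) (k : String),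
      (L.foldl (fun seen d => seen.setdefault (pvCode ck d) (pvLookupValue d nk)) seen).get? k
        = (seen.get? k).or ((L.find? (fun d => pvCode ck d == k)).map (fun d => pvLookupValue d nk)) := by
  intro L
  induction L with
  | nil => intro seen k; simp
  | cons d t ih =>
    intro seen k
    rw [List.foldl_cons, ih, List.find?_cons]
    by_cases hdk : pvCode ck d = k
    · have hbt : (pvCode ck d == k) = true := by simp [hdk]
      simp only [hbt]
      by_cases hc : seen.contains (pvCode ck d) = true
      · rw [PySem.Dict.setdefault_of_contains seen _ hc]
        have : (seen.get? k).isSome := by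
          rw [← hdk, ← PySem.Dict.contains_eq_isSome_get?]; exact hc
        obtain ⟨v, hv⟩ := Option.isSome_iff_exists.mp this
        simp [hv]
      · have hc' : seen.contains (pvCode ck d) = false := by simpa using hc
        rw [PySem.Dict.setdefault_of_not_contains seen _ hc', hdk, PySem.Dict.get?_insert_self]
        have : seen.get? k = none := by
          rw [← Option.not_isSome_iff_eq_none, ← PySem.Dict.contains_eq_isSome_get?, ← hdk]
          simp [hc']
        simp [this]
    · have hbf : (pvCode ck d == k) = false := by simp [hdk]
      simp only [hbf]
      by_cases hc : seen.contains (pvCode ck d) = true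
      · rw [PySem.Dict.setdefault_of_contains seen _ hc]
      · have hc' : seen.contains (pvCode ck d) = false := by simpa using hc
        rw [PySem.Dict.setdefault_of_not_contains seen _ hc',
          PySem.Dict.get?_insert_of_ne seen _ (fun h => hdk h.symm)]

-- The setdefault loop: keys = first-occurrence set of the codes.
theorem pv_foldl_sd_keys_pf (ck nk : String) :
    ∀ (L : List (List (String × String))) (seen : PySem.Dict String (List (String × String))),
      (L.foldl (fun seen d => seen.setdefault (pvCode ck d) (pvLookupValue d nk)) seen).keys
        = (L.map (pvCode ck)).foldl PySem.Set.add seen.keys := by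
  intro L
  induction L with
  | nil => intro seen; rfl
  | cons d t ih =>
    intro seen
    rw [List.foldl_cons, ih, List.map_cons, List.foldl_cons, pv_keys_setdefault]

-- Both sides in the same closed form.
theorem pv_A_closed (dict_iter : List (List (String × String))) (ck nk : String) :
    translate_codes_by_group dict_iter ck nk
      = (PySem.List.sorted (PySem.Set.ofList ((dict_iter.filter (fun d => (pvGet? d ck).isSome)).map (pvCode ck))) (fun s => s) false).map
          (fun k => (k, pvLookupValue (((dict_iter.filter (fun d => (pvGet? d ck).isSome)).find? (fun d => pvCode ck d == k)).getD []) nk)) := by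
  simp only [translate_codes_by_group]
  set L := dict_iter.filter (fun d => (pvGet? d ck).isSome) with hL
  set S := PySem.List.sorted L (pvCode ck) false with hS
  have hgf := pv_gf ck S.length S le_rfl (by rw [hS]; exact PySem.List.sorted_pairwise L (pvCode ck))
  rw [hgf, List.map_map]
  have hfind : ∀ k, S.find? (fun d => pvCode ck d == k) = L.find? (fun d => pvCode ck d == k) := by
    intro k
    rw [← List.head?_filter, ← List.head?_filter, hS, pv_sorted_filter]
  have hkeys : PySem.List.sorted (PySem.Set.ofList (S.map (pvCode ck))) (fun s => s) false
      = PySem.List.sorted (PySem.Set.ofList (L.map (pvCode ck))) (fun s => s) false := by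
    apply PySem.List.sorted_eq_sorted_of_perm _ _ _ (fun a b h => h)
    apply (List.perm_ext_iff_of_nodup (PySem.Set.nodup_ofList _) (PySem.Set.nodup_ofList _)).mpr
    intro a
    rw [PySem.Set.mem_ofList, PySem.Set.mem_ofList]
    constructor
    · rintro ha
      obtain ⟨d, hd, rfl⟩ := List.mem_map.mp ha
      exact List.mem_map_of_mem ((PySem.List.sorted_perm L (pvCode ck) false).mem_iff.mp hd)
    · rintro ha
      obtain ⟨d, hd, rfl⟩ := List.mem_map.mp ha
      exact List.mem_map_of_mem ((PySem.List.sorted_perm L (pvCode ck) false).mem_iff.mpr hd)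
  have hitems : ∀ (gl : List (String × List (String × String))), (gl.map Prod.fst).Nodup →
      (PySem.Dict.ofList gl).items = gl := by
    intro gl hnd
    have := PySem.Dict.items_foldl_insert_fresh gl Prod.fst Prod.snd PySem.Dict.empty
      (fun a _ => rfl) hnd
    simpa using this
  rw [hitems, hkeys]
  · apply List.map_congr_left
    intro k _
    simp only [Function.comp_apply, hfind k]
  · rw [List.map_map]
    have : (Prod.fst ∘
        (fun p => (p.1, pvLookupValue p.2 nk)) ∘ fun k => (k, (S.find? (fun d => pvCode ck d == k)).getD []))
        = fun k => k := rfl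
    rw [this]
    simp only [List.map_id']
    exact List.Pairwise.imp (fun h => ne_of_lt h) (PySem.List.sorted_ofList_pairwise_lt _)

theorem pv_B_closed (dict_iter : List (List (String × String))) (ck nk : String) :
    translate_codes_by_group_alt dict_iter ck nk
      = (PySem.List.sorted (PySem.Set.ofList ((dict_iter.filter (fun d => (pvGet? d ck).isSome)).map (pvCode ck))) (fun s => s) false).map
          (fun k => (k, (((dict_iter.filter (fun d => (pvGet? d ck).isSome)).find? (fun d => pvCode ck d == k)).map (fun d => pvLookupValue d nk)).getD [])) := by
  simp only [translate_codes_by_group_alt]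
  rw [PySem.List.foldl_if_eq_foldl_filter (fun d => (pvGet? d ck).isSome)
    (fun seen d => seen.setdefault (pvCode ck d) (pvLookupValue d nk)) dict_iter PySem.Dict.empty]
  set L := dict_iter.filter (fun d => (pvGet? d ck).isSome) with hL
  rw [pv_foldl_sd_keys_pf ck nk L PySem.Dict.empty]
  have hke : (PySem.Dict.empty : PySem.Dict String (List (String × String))).keys = [] := rfl
  rw [hke, ← PySem.Set.ofList_eq_foldl]
  apply List.map_congr_left
  intro k _
  rw [PySem.Dict.getD_eq_get?_getD, pv_foldl_sd_get?_pf ck nk L PySem.Dict.empty k]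
  simp [PySem.Dict.get?_empty]

-- ===== VERDICT (by name: the statement is the Claim_ definition above) =====
theorem translate_codes_by_group_spec : Claim_equal_translate_codes_by_group := by
  intro dict_iter ck nk _hdom _hpre
  unfold Spec_translate_codes_by_group
  rw [pv_A_closed, pv_B_closed]
  apply List.map_congr_left
  intro k hk
  rw [PySem.List.mem_sorted, PySem.Set.mem_ofList, List.mem_map] at hk
  obtain ⟨d, hd, hdk⟩ := hk
  have : ((dict_iter.filter (fun d => (pvGet? d ck).isSome)).find? (fun d => pvCode ck d == k)).isSome := by
    rw [List.find?_isSome]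
    exact ⟨d, hd, by simp [hdk]⟩
  obtain ⟨d0, hd0⟩ := Option.isSome_iff_exists.mp this
  simp [hd0]
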